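-- pv_equiv track=rewrite | github.com/stalj/prg-basics | 04-Functions/7.20.py | sum_repeated
-- ===== SOURCE A (Python) =====
-- def sum_repeated(number):
--     suma=0
--     number_str=str(number)
--     for i in range(10):
--         count=number_str.count(str(i))
--         if count>1:
--             suma+=count*i
--
--     return suma
-- ===== SOURCE B (Python) =====
-- def sum_repeated(number):
--     # Online one-pass: track digits seen once and digits seen twice-or-more.
--     # On the second occurrence add the digit twice (the two occurrences so far); on each
--     # later occurrence add it once more, so a repeated digit contributes count times its value.
--     seen = set()
--     multi = set()
--     total = 0
--     for ch in str(number):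
--         if not ch.isdigit():
--             continue
--         if ch in multi:
--             total += int(ch)
--         elif ch in seen:
--             multi.add(ch)
--             total += 2 * int(ch)
--         else:
--             seen.add(ch)
--     return total
-- ===== Notes on version B (the rewrite author's own statement) =====
-- stated objective: alternative
-- what changed: B replaces A's ten str.count scans with a single online pass over the characters that maintains two sets (digits seen once, digits seen at least twice) and accumulates the sum as repeats are discovered: twice the digit at its second occurrence and the digit again at each later occurrence.
import Mathlib
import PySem

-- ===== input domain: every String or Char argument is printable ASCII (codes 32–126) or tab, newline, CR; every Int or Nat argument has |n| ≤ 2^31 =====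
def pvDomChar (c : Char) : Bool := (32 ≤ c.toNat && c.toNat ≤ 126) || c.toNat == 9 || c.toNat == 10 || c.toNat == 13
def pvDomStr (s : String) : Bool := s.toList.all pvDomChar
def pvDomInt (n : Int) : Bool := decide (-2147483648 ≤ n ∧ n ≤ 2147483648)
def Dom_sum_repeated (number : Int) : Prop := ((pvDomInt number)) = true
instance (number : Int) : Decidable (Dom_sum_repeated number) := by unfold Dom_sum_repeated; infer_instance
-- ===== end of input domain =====

-- B is an online one-pass algorithm over str(number) with two sets (seen once /
-- seen twice-or-more), adding twice the digit at its second occurrence and the digit at each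
-- later one, instead of A's ten str.count scans (objective: alternative).

-- ===== PORT A =====
def sum_repeated (number : Int) : Int :=
  let number_str := PySem.Int.toStr number
  (PySem.List.pyRange 0 10 1).foldl
    (fun suma i =>
      let count := PySem.Str.count number_str (PySem.Int.toStr i)
      if count > 1 then suma + (count : Int) * i else suma)
    0

-- ===== PORT B =====
-- one loop iteration of B: state = (seen, multi, total)
def pvBStep (st : PySem.Set Char × PySem.Set Char × Int) (ch : Char) :
    PySem.Set Char × PySem.Set Char × Int :=
  if PySem.Chars.isdigit ch then
    if PySem.Set.contains st.2.1 ch then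
      (st.1, st.2.1, st.2.2 + (PySem.Int.ofChars? [ch]).getD 0)
    else if PySem.Set.contains st.1 ch then
      (st.1, PySem.Set.add st.2.1 ch, st.2.2 + 2 * (PySem.Int.ofChars? [ch]).getD 0)
    else
      (PySem.Set.add st.1 ch, st.2.1, st.2.2)
  else st

def sum_repeated_alt (number : Int) : Int :=
  ((PySem.Int.toChars number).foldl pvBStep
    (PySem.Set.empty, PySem.Set.empty, 0)).2.2

-- ===== PRECONDITION & SPEC =====
def Spec_sum_repeated (number : Int) (out : Int) : Prop := out = sum_repeated_alt number
instance (number : Int) (out : Int) : Decidable (Spec_sum_repeated number out) := by unfold Spec_sum_repeated; infer_instance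

-- ===== CLAIM (what is proved, stated in full; the proofs are below) =====
def Claim_equal_sum_repeated : Prop := ∀ (number : Int), Dom_sum_repeated number → Spec_sum_repeated number (sum_repeated number)

-- ===== LEMMAS AND PROOFS =====

-- the ten digit characters, in A's scan order, and the numeric value of a digit character
def pvD10 : List Char := ['0','1','2','3','4','5','6','7','8','9']
def pvVal (c : Char) : Int := ((c.toNat : Int) - 48)

-- the target quantity: Σ over the ten digits of count*value when count > 1
def pvF (p : List Char) : Int :=
  (pvD10.map (fun c => if 1 < p.count c then ((p.count c : Nat) : Int) * pvVal c else 0)).sum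

-- loop invariant of B: p is the digits-only part of the processed prefix
def pvInv (p : List Char) (st : PySem.Set Char × PySem.Set Char × Int) : Prop :=
  (∀ c, c ∈ st.1 ↔ 0 < p.count c) ∧ (∀ c, c ∈ st.2.1 ↔ 1 < p.count c) ∧ st.2.2 = pvF p

-- Python s.count(sub) for a single-character sub is the plain character count
theorem count_go_singleton (c : Char) (l : List Char) (fuel : Nat) (acc : Nat)
    (h : l.length ≤ fuel) :
    PySem.Chars.count.go [c] fuel l acc = acc + l.count c := by
  induction l generalizing fuel acc with
  | nil => cases fuel <;> simp [PySem.Chars.count.go]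
  | cons x t ih =>
    cases fuel with
    | zero => simp at h
    | succ f =>
      simp only [PySem.Chars.count.go]
      by_cases hx : x = c
      · subst hx
        simp only [List.isPrefixOf, BEq.rfl, Bool.true_and, List.length_singleton,
          List.drop_succ_cons, List.drop_zero]
        rw [ih f (acc+1) (by simpa using h)]
        simp
        omega
      · rw [if_neg (by simp [List.isPrefixOf]; exact fun h' => hx h'.symm),
          ih f acc (by simpa using h)]
        simp [hx]

theorem count_singleton (s : List Char) (c : Char) :
    PySem.Chars.count s [c] = s.count c := by
  have := count_go_singleton c s s.length 0 le_rfl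
  simpa [PySem.Chars.count] using this

theorem isdigit_of_mem_pvD10 : ∀ c ∈ pvD10, PySem.Chars.isdigit c = true := by
  intro c hc; fin_cases hc <;> decide

theorem mem_pvD10_of_isdigit (c : Char) (h : PySem.Chars.isdigit c = true) : c ∈ pvD10 := by
  simp [PySem.Chars.isdigit] at h
  obtain ⟨h1, h2⟩ := h
  have hlo : 48 ≤ c.toNat := h1
  have hhi : c.toNat ≤ 57 := h2
  have : c = Char.ofNat c.toNat := (Char.ofNat_toNat c).symm
  interval_cases hn : c.toNat <;> simp_all [pvD10]

theorem ofChars?_val : ∀ c ∈ pvD10, (PySem.Int.ofChars? [c]).getD 0 = pvVal c := by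
  intro c hc; fin_cases hc <;> decide

theorem toChars_val : ∀ c ∈ pvD10, (PySem.Int.toChars (pvVal c)) = [c] := by
  intro c hc; fin_cases hc <;> decide

-- A as a sum over the ten digit characters
theorem A_eq (number : Int) :
    sum_repeated number =
      ((pvD10.filter (fun c => decide (1 < (PySem.Int.toChars number).count c))).map
        (fun c => ((PySem.Int.toChars number).count c : Int) * pvVal c)).sum := by
  unfold sum_repeated
  have hR : PySem.List.pyRange 0 10 1 = pvD10.map pvVal := by decide
  rw [hR]
  rw [PySem.List.foldl_ite_eq_foldl_filter
        (p := fun i => 1 < PySem.Str.count (PySem.Int.toStr number) (PySem.Int.toStr i))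
        (f := fun suma i => suma + (PySem.Str.count (PySem.Int.toStr number) (PySem.Int.toStr i) : Int) * i)]
  rw [PySem.List.foldl_add
        (g := fun i => (PySem.Str.count (PySem.Int.toStr number) (PySem.Int.toStr i) : Int) * i)]
  rw [List.filter_map, List.map_map]
  rw [List.filter_congr (l := pvD10)
        (q := fun c => decide (1 < (PySem.Int.toChars number).count c))
        (by intro c hc
            simp only [Function.comp]
            congr 1
            rw [PySem.Str.count_eq, PySem.Int.toList_toStr, PySem.Int.toList_toStr, toChars_val c hc,
              count_singleton])]
  rw [List.map_congr_left (by
      intro c hc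
      have hc' : c ∈ pvD10 := List.mem_of_mem_filter hc
      simp only [Function.comp]
      rw [PySem.Str.count_eq, PySem.Int.toList_toStr, PySem.Int.toList_toStr, toChars_val c hc',
        count_singleton])]
  simp

-- filter-then-map-then-sum as an if-inside-map sum
theorem sum_filter_map (l : List Char) (P : Char → Bool) (f : Char → Int) :
    ((l.filter P).map f).sum = (l.map (fun c => if P c then f c else 0)).sum := by
  induction l with
  | nil => rfl
  | cons x t ih =>
    by_cases h : P x <;> simp [h, ih]

theorem A_eq_F (number : Int) :
    sum_repeated number = pvF (PySem.Int.toChars number) := by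
  rw [A_eq, sum_filter_map]
  unfold pvF
  refine congrArg List.sum (List.map_congr_left ?_)
  intro c _
  by_cases h : 1 < (PySem.Int.toChars number).count c <;> simp [h]

-- replacing a nodup list's map at a single member shifts the sum by the difference there
theorem sum_map_update (l : List Char) (hl : l.Nodup) (x : Char) (hx : x ∈ l)
    (f f' : Char → Int) (h : ∀ c, c ≠ x → f' c = f c) :
    (l.map f').sum = (l.map f).sum + (f' x - f x) := by
  induction l with
  | nil => simp at hx
  | cons a t ih =>
    by_cases hax : a = x
    · subst hax
      have hnt : a ∉ t := (List.nodup_cons.mp hl).1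
      have ht : t.map f' = t.map f := List.map_congr_left (by
        intro c hc; exact h c (fun hca => hnt (hca ▸ hc)))
      simp [ht]; ring
    · have hxt : x ∈ t := (List.mem_cons.mp hx).resolve_left (fun h' => hax h'.symm)
      have := ih (List.nodup_cons.mp hl).2 hxt
      simp only [List.map_cons, List.sum_cons, this, h a hax]
      ring

theorem pvF_append (p : List Char) (x : Char) (hx : x ∈ pvD10) :
    pvF (p ++ [x]) = pvF p +
      ((if 1 < p.count x + 1 then ((p.count x + 1 : Nat) : Int) * pvVal x else 0)
       - (if 1 < p.count x then ((p.count x : Nat) : Int) * pvVal x else 0)) := by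
  unfold pvF
  have hc : ∀ c, (p ++ [x]).count c = p.count c + (if c = x then 1 else 0) := by
    intro c
    by_cases h : c = x
    · subst h; simp [List.count_append]
    · simp [List.count_append, h, (show x ≠ c from fun h' => h h'.symm)]
  rw [sum_map_update pvD10 (by decide) x hx _ _ (by
    intro c hcx
    rw [hc c, if_neg hcx])]
  rw [hc x]
  simp

-- one digit step preserves the invariant
theorem inv_step_digit (p : List Char) (st : PySem.Set Char × PySem.Set Char × Int)
    (x : Char) (hd : PySem.Chars.isdigit x = true) (h : pvInv p st) :
    pvInv (p ++ [x]) (pvBStep st x) := by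
  obtain ⟨h1, h2, h3⟩ := h
  have hx10 := mem_pvD10_of_isdigit x hd
  have hval := ofChars?_val x hx10
  have hcnt : ∀ c, (p ++ [x]).count c = p.count c + (if c = x then 1 else 0) := by
    intro c
    by_cases hcx : c = x
    · subst hcx; simp [List.count_append]
    · simp [List.count_append, hcx, (show x ≠ c from fun h' => hcx h'.symm)]
  unfold pvBStep
  rw [if_pos hd]
  by_cases hm : x ∈ st.2.1
  · rw [if_pos ((PySem.Set.contains_iff _ _).mpr hm)]
    have hk : 1 < p.count x := (h2 x).mp hm
    refine ⟨?_, ?_, ?_⟩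
    · intro c; rw [hcnt c]; by_cases hcx : c = x
      · subst hcx; rw [if_pos rfl, h1 c]; omega
      · rw [if_neg hcx]; simpa using h1 c
    · intro c; rw [hcnt c]; by_cases hcx : c = x
      · subst hcx; rw [if_pos rfl, h2 c]; omega
      · rw [if_neg hcx]; simpa using h2 c
    · show st.2.2 + (PySem.Int.ofChars? [x]).getD 0 = pvF (p ++ [x])
      rw [hval, h3, pvF_append p x hx10,
        if_pos (show 1 < p.count x + 1 by omega), if_pos hk]
      push_cast; ring
  · rw [if_neg (fun hcon => hm ((PySem.Set.contains_iff _ _).mp hcon))]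
    by_cases hs : x ∈ st.1
    · rw [if_pos ((PySem.Set.contains_iff _ _).mpr hs)]
      have hk1 : 0 < p.count x := (h1 x).mp hs
      have hk2 : ¬ 1 < p.count x := fun hlt => hm ((h2 x).mpr hlt)
      have hk : p.count x = 1 := by omega
      refine ⟨?_, ?_, ?_⟩
      · intro c; rw [hcnt c]; by_cases hcx : c = x
        · subst hcx; rw [if_pos rfl, h1 c]; omega
        · rw [if_neg hcx]; simpa using h1 c
      · intro c
        rw [hcnt c, PySem.Set.mem_add]
        by_cases hcx : c = x
        · subst hcx; rw [if_pos rfl]; simp [hk]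
        · rw [if_neg hcx]; simp [hcx, h2 c]
      · show st.2.2 + 2 * (PySem.Int.ofChars? [x]).getD 0 = pvF (p ++ [x])
        rw [hval, h3, pvF_append p x hx10, hk]
        norm_num
    · rw [if_neg (fun hcon => hs ((PySem.Set.contains_iff _ _).mp hcon))]
      have hk : p.count x = 0 := by
        by_contra h'
        exact hs ((h1 x).mpr (by omega))
      refine ⟨?_, ?_, ?_⟩
      · intro c
        rw [hcnt c, PySem.Set.mem_add]
        by_cases hcx : c = x
        · subst hcx; rw [if_pos rfl]; simp [hk]
        · rw [if_neg hcx]; simp [hcx, h1 c]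
      · intro c; rw [hcnt c]; by_cases hcx : c = x
        · subst hcx; rw [if_pos rfl, h2 c]; omega
        · rw [if_neg hcx]; simpa using h2 c
      · show st.2.2 = pvF (p ++ [x])
        rw [h3, pvF_append p x hx10, hk]
        norm_num

theorem loop_inv (cs : List Char) (p : List Char)
    (st : PySem.Set Char × PySem.Set Char × Int) (h : pvInv p st) :
    pvInv (p ++ cs.filter (fun c => PySem.Chars.isdigit c)) (cs.foldl pvBStep st) := by
  induction cs generalizing p st with
  | nil => simpa using h
  | cons x t ih =>
    by_cases hd : PySem.Chars.isdigit x = true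
    · have := ih (p ++ [x]) (pvBStep st x) (inv_step_digit p st x hd h)
      simpa [List.filter_cons, hd, List.append_assoc] using this
    · have hstep : pvBStep st x = st := by unfold pvBStep; simp [hd]
      have := ih p st h
      simpa [List.filter_cons, hd, hstep] using this

theorem B_eq_F (number : Int) :
    sum_repeated_alt number =
      pvF ((PySem.Int.toChars number).filter (fun c => PySem.Chars.isdigit c)) := by
  have hinit : pvInv [] ((PySem.Set.empty, PySem.Set.empty, 0) :
      PySem.Set Char × PySem.Set Char × Int) := by
    refine ⟨?_, ?_, ?_⟩ <;> simp [PySem.Set.empty, pvF, pvD10]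
  have := loop_inv (PySem.Int.toChars number) [] _ hinit
  simpa [sum_repeated_alt] using this.2.2

-- ===== VERDICT (by name: the statement is the Claim_ definition above) =====
theorem sum_repeated_spec : Claim_equal_sum_repeated := by
  intro number _
  unfold Spec_sum_repeated
  rw [A_eq_F, B_eq_F]
  unfold pvF
  refine congrArg List.sum (List.map_congr_left ?_)
  intro c hc
  rw [List.count_filter (isdigit_of_mem_pvD10 c hc)]
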